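-- pv_equiv track=rewrite | github.com/Vatsalparsaniya/Realtime-OpenCV-Chess | chess_main.py | map_move_to_number
-- ===== SOURCE A (Python) =====
-- def map_move_to_number(move):
--     map_num = 0
--     for i in "12345678":
--         for j in "abcdefgh":
--             if move == str(j)+str(i):
--                 return map_num
--             else:
--                 map_num += 1
-- ===== SOURCE B (Python) =====
-- def map_move_to_number(move):
--     # closed-form: (rank-1)*8 + file, guarded so every non-square input yields None
--     if len(move) == 2 and 'a' <= move[0] <= 'h' and '1' <= move[1] <= '8':
--         return (ord(move[1]) - ord('1')) * 8 + (ord(move[0]) - ord('a'))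
--     return None
-- ===== Notes on version B (the rewrite author's own statement) =====
-- stated objective: simpler
-- what changed: Replaced the 64-iteration nested scan over all square names with a length/range guard and the closed-form index (rank-1)*8 + file computed from character codes.
import Mathlib
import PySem

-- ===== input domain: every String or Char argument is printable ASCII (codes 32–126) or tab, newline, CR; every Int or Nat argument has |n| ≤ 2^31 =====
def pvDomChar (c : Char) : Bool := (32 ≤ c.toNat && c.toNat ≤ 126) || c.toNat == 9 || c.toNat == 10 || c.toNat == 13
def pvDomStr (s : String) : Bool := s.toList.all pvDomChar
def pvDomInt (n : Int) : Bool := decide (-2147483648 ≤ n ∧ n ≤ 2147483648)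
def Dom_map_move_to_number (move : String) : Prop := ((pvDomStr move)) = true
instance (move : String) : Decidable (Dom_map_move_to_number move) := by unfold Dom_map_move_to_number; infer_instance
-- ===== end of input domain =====

-- B replaces A's 64-step nested scan by a guard plus the closed-form index (rank-1)*8+file (simpler).

-- ===== PORT A =====
-- inner 'for j in "abcdefgh"': returns .inl map_num on a match, else .inr of the updated counter;
-- the Python comparison move == str(j)+str(i) is string equality, i.e. equality of the char lists
def pvGoJ (cs : List Char) (i : Char) : List Char → Int → Sum Int Int
  | [], n => .inr n
  | j :: rest, n =>
    if cs = [j, i] then .inl n else pvGoJ cs i rest (n + 1)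

-- outer 'for i in "12345678"': falls off the end → Python returns None
def pvGoI (cs : List Char) : List Char → Int → Option Int
  | [], _ => none
  | i :: rest, n =>
    match pvGoJ cs i "abcdefgh".toList n with
    | .inl v => some v
    | .inr n' => pvGoI cs rest n'

def map_move_to_number (move : String) : Option Int :=
  pvGoI move.toList "12345678".toList 0

-- ===== PORT B =====
-- 'a' <= move[0] <= 'h' etc. are ported as the equivalent code-point bounds (ord 'a' = 97 … ord '8' = 56)
def map_move_to_number_alt (move : String) : Option Int :=
  match move.toList with
  | [f, r] =>
    if 97 ≤ f.toNat ∧ f.toNat ≤ 104 ∧ 49 ≤ r.toNat ∧ r.toNat ≤ 56 then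
      some (((r.toNat : Int) - 49) * 8 + ((f.toNat : Int) - 97))
    else none
  | _ => none

-- ===== PRECONDITION & SPEC =====
def Spec_map_move_to_number (move : String) (out : Option Int) : Prop := out = map_move_to_number_alt move
instance (move : String) (out : Option Int) : Decidable (Spec_map_move_to_number move out) := by unfold Spec_map_move_to_number; infer_instance

-- ===== CLAIM (what is proved, stated in full; the proofs are below) =====
def Claim_equal_map_move_to_number : Prop := ∀ (move : String), Dom_map_move_to_number move → Spec_map_move_to_number move (map_move_to_number move)

-- ===== LEMMAS AND PROOFS =====

theorem pvGoJ_none (cs : List Char) (i : Char) (js : List Char) (n : Int)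
    (h : ∀ j ∈ js, cs ≠ [j, i]) : ∃ m, pvGoJ cs i js n = .inr m := by
  induction js generalizing n with
  | nil => exact ⟨n, rfl⟩
  | cons j rest ih =>
    simp only [pvGoJ]
    rw [if_neg (h j (List.mem_cons_self))]
    exact ih (n + 1) (fun j' hj' => h j' (List.mem_cons_of_mem _ hj'))

theorem pvGoI_none (cs : List Char) (is : List Char) (n : Int)
    (h : ∀ i ∈ is, ∀ j ∈ "abcdefgh".toList, cs ≠ [j, i]) : pvGoI cs is n = none := by
  induction is generalizing n with
  | nil => rfl
  | cons i rest ih =>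
    simp only [pvGoI]
    obtain ⟨m, hm⟩ := pvGoJ_none cs i "abcdefgh".toList n (h i List.mem_cons_self)
    rw [hm]
    exact ih m (fun i' hi' => h i' (List.mem_cons_of_mem _ hi'))

-- on a valid square the scan returns exactly the closed-form index (64 closed cases)
theorem pv_hit (f r : Char) (h1 : 97 ≤ f.toNat) (h2 : f.toNat ≤ 104)
    (h3 : 49 ≤ r.toNat) (h4 : r.toNat ≤ 56) :
    pvGoI [f, r] "12345678".toList 0 =
      some (((r.toNat : Int) - 49) * 8 + ((f.toNat : Int) - 97)) := by
  have hf : f.toNat = 97 ∨ f.toNat = 98 ∨ f.toNat = 99 ∨ f.toNat = 100 ∨ f.toNat = 101 ∨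
      f.toNat = 102 ∨ f.toNat = 103 ∨ f.toNat = 104 := by omega
  have hr : r.toNat = 49 ∨ r.toNat = 50 ∨ r.toNat = 51 ∨ r.toNat = 52 ∨ r.toNat = 53 ∨
      r.toNat = 54 ∨ r.toNat = 55 ∨ r.toNat = 56 := by omega
  rw [← Char.ofNat_toNat f, ← Char.ofNat_toNat r]
  rcases hf with hf | hf | hf | hf | hf | hf | hf | hf <;>
    rcases hr with hr | hr | hr | hr | hr | hr | hr | hr <;>
    rw [hf, hr] <;> decide

theorem pv_miss (f r : Char)
    (hg : ¬(97 ≤ f.toNat ∧ f.toNat ≤ 104 ∧ 49 ≤ r.toNat ∧ r.toNat ≤ 56)) :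
    pvGoI [f, r] "12345678".toList 0 = none := by
  apply pvGoI_none
  intro i hi j hj heq
  obtain ⟨rfl, rfl⟩ : f = j ∧ r = i := by simpa using heq
  simp only [show "12345678".toList = ['1','2','3','4','5','6','7','8'] from rfl] at hi
  simp only [show "abcdefgh".toList = ['a','b','c','d','e','f','g','h'] from rfl] at hj
  apply hg
  fin_cases hi <;> fin_cases hj <;> refine ⟨by decide, by decide, by decide, by decide⟩

theorem map_move_to_number_spec : Claim_equal_map_move_to_number := by
  intro move _
  unfold Spec_map_move_to_number map_move_to_number map_move_to_number_alt
  match h : move.toList with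
  | [] => exact pvGoI_none _ _ _ (by intro i _ j _ heq; simp at heq)
  | [a] => exact pvGoI_none _ _ _ (by intro i _ j _ heq; simp at heq)
  | a :: b :: c :: rest => exact pvGoI_none _ _ _ (by intro i _ j _ heq; simp at heq)
  | [f, r] =>
    show pvGoI [f, r] "12345678".toList 0 =
      if 97 ≤ f.toNat ∧ f.toNat ≤ 104 ∧ 49 ≤ r.toNat ∧ r.toNat ≤ 56 then
        some (((r.toNat : Int) - 49) * 8 + ((f.toNat : Int) - 97))
      else none
    by_cases hg : 97 ≤ f.toNat ∧ f.toNat ≤ 104 ∧ 49 ≤ r.toNat ∧ r.toNat ≤ 56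
    · rw [if_pos hg]
      exact pv_hit f r hg.1 hg.2.1 hg.2.2.1 hg.2.2.2
    · rw [if_neg hg]
      exact pv_miss f r hg
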